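-- pv_equiv track=rewrite | github.com/cspenn/LuxTTS | zipvoice/utils/infer.py | chunk_tokens_dialog
-- ===== SOURCE A (Python) =====
-- def chunk_tokens_dialog(tokens_list: list[str], max_tokens: int = 100):
--     """Split dialog tokens into chunks at speaker-turn boundaries.
--
--     Splits the token list at ``[S1]`` speaker-turn markers, then merges short
--     dialog turns until each chunk contains at most ``max_tokens`` tokens.
--
--     Args:
--         tokens_list: The list of tokens to be split.
--         max_tokens: Maximum number of tokens per chunk.
--
--     Returns:
--         A list of token-list chunks.
--     """
--     # 1. Split the tokens according to speaker-turn symbol [S1].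
--     dialogs = []
--     current_dialog = []
--     for token in tokens_list:
--         if token == "[S1]":  # noqa: S105
--             if len(current_dialog) != 0:
--                 dialogs.append(current_dialog)
--             current_dialog = []
--         current_dialog.append(token)
--     # Assume the last few tokens are also a dialog
--     if len(current_dialog) != 0:
--         dialogs.append(current_dialog)
--
--     # 2. Merge short dialogs.
--     chunks = []
--     current_chunk = []
--     for dialog in dialogs:
--         if len(current_chunk) + len(dialog) <= max_tokens:
--             current_chunk.extend(dialog)
--         else:
--             if len(current_chunk) > 0:
--                 chunks.append(current_chunk)
--             current_chunk = dialog
--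
--     if len(current_chunk) > 0:
--         chunks.append(current_chunk)
--
--     return chunks
-- ===== SOURCE B (Python) =====
-- def chunk_tokens_dialog(tokens_list: list[str], max_tokens: int = 100):
--     """Single-pass fusion: merge each completed dialog turn into the running
--     chunk the moment a new [S1] marker starts the next turn."""
--     chunks = []
--     current_chunk = []
--     current_dialog = []
--
--     def merge(dialog):
--         nonlocal current_chunk
--         if len(current_chunk) + len(dialog) <= max_tokens:
--             current_chunk.extend(dialog)
--         else:
--             if current_chunk:
--                 chunks.append(current_chunk)
--             current_chunk = dialog
--
--     for token in tokens_list: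
--         if token == "[S1]" and current_dialog:
--             merge(current_dialog)
--             current_dialog = []
--         current_dialog.append(token)
--     if current_dialog:
--         merge(current_dialog)
--     if current_chunk:
--         chunks.append(current_chunk)
--     return chunks
-- ===== Notes on version B (the rewrite author's own statement) =====
-- stated objective: simpler
-- what changed: Fused A's two passes (split tokens into a dialogs list, then greedily merge dialogs into chunks) into one loop over the tokens that merges each completed dialog turn on the fly, eliminating the intermediate dialogs list.
import Mathlib
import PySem

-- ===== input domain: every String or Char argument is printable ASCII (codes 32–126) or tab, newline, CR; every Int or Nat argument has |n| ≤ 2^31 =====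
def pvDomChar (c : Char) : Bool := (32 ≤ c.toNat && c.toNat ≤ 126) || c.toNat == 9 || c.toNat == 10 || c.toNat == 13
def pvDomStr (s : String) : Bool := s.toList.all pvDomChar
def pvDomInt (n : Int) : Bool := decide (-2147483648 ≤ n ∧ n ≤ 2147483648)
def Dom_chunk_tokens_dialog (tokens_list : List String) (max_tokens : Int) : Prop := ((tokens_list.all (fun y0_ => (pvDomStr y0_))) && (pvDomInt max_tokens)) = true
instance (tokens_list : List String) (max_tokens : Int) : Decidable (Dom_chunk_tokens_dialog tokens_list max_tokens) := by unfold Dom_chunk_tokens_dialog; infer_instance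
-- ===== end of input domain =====

-- B fuses A's two passes (split into dialogs, then greedy merge) into one loop over the
-- tokens, eliminating the intermediate dialogs list; objective: simpler/alternative, same cost.

-- ===== PORT A =====
-- loop body of A's pass 1: split at "[S1]" markers; state = (dialogs, current_dialog)
def pvA_split (p : List (List String) × List String) (t : String) :
    List (List String) × List String :=
  if t = "[S1]" then
    ((if p.2.length ≠ 0 then p.1 ++ [p.2] else p.1), [t])
  else (p.1, p.2 ++ [t])

-- loop body of A's pass 2: greedy merge; state = (chunks, current_chunk)
def pvA_merge (max_tokens : Int) (q : List (List String) × List String) (d : List String) :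
    List (List String) × List String :=
  if (q.2.length : Int) + (d.length : Int) ≤ max_tokens then (q.1, q.2 ++ d)
  else ((if q.2.length > 0 then q.1 ++ [q.2] else q.1), d)

def chunk_tokens_dialog (tokens_list : List String) (max_tokens : Int) : List (List String) :=
  let p := tokens_list.foldl pvA_split ([], [])
  let dialogs := if p.2.length ≠ 0 then p.1 ++ [p.2] else p.1
  let q := dialogs.foldl (pvA_merge max_tokens) ([], [])
  if q.2.length > 0 then q.1 ++ [q.2] else q.1

-- ===== PORT B =====
-- B's merge helper (the nonlocal `merge` in Source B); state = (chunks, current_chunk)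
def pvB_merge (max_tokens : Int) (s : List (List String) × List String) (d : List String) :
    List (List String) × List String :=
  if (s.2.length : Int) + (d.length : Int) ≤ max_tokens then (s.1, s.2 ++ d)
  else ((if s.2 ≠ [] then s.1 ++ [s.2] else s.1), d)

-- B's single fused loop body; state = (current_dialog, (chunks, current_chunk))
def pvB_step (max_tokens : Int) (p : List String × (List (List String) × List String))
    (t : String) : List String × (List (List String) × List String) :=
  if t = "[S1]" ∧ p.1 ≠ [] then ([t], pvB_merge max_tokens p.2 p.1)
  else (p.1 ++ [t], p.2)

def chunk_tokens_dialog_alt (tokens_list : List String) (max_tokens : Int) : List (List String) :=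
  let st := tokens_list.foldl (pvB_step max_tokens) ([], ([], []))
  let s := if st.1 ≠ [] then pvB_merge max_tokens st.2 st.1 else st.2
  if s.2 ≠ [] then s.1 ++ [s.2] else s.1

-- ===== PRECONDITION & SPEC =====
def Spec_chunk_tokens_dialog (tokens_list : List String) (max_tokens : Int) (out : List (List String)) : Prop := out = chunk_tokens_dialog_alt tokens_list max_tokens
instance (tokens_list : List String) (max_tokens : Int) (out : List (List String)) : Decidable (Spec_chunk_tokens_dialog tokens_list max_tokens out) := by unfold Spec_chunk_tokens_dialog; infer_instance

-- ===== CLAIM (what is proved, stated in full; the proofs are below) =====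
def Claim_equal_chunk_tokens_dialog : Prop := ∀ (tokens_list : List String) (max_tokens : Int), Dom_chunk_tokens_dialog tokens_list max_tokens → Spec_chunk_tokens_dialog tokens_list max_tokens (chunk_tokens_dialog tokens_list max_tokens)

-- ===== LEMMAS AND PROOFS =====

-- A's two merge-step bodies are the same function (len > 0 vs truthiness).
theorem merge_eq (max_tokens : Int) : pvA_merge max_tokens = pvB_merge max_tokens := by
  funext q d
  simp only [pvA_merge, pvB_merge, List.length_pos_iff]

-- The split fold's dialog accumulator composes by prepending.
theorem split_acc (ts : List String) : ∀ (ds : List (List String)) (cur : List String),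
    ts.foldl pvA_split (ds, cur)
      = (ds ++ (ts.foldl pvA_split ([], cur)).1, (ts.foldl pvA_split ([], cur)).2) := by
  induction ts with
  | nil => intro ds cur; simp
  | cons t ts ih =>
    intro ds cur
    simp only [List.foldl_cons, pvA_split]
    by_cases h1 : t = "[S1]"
    · subst h1
      rw [if_pos rfl, if_pos rfl]
      by_cases h2 : cur.length ≠ 0
      · rw [if_pos h2, if_pos h2, List.nil_append,
           ih (ds ++ [cur]) ["[S1]"], ih [cur] ["[S1]"]]
        simp
      · rw [if_neg h2, if_neg h2]
        exact ih ds ["[S1]"]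
    · rw [if_neg h1, if_neg h1]
      exact ih ds (cur ++ [t])

-- Fusing: B's single loop computes the final current_dialog of A's split pass together
-- with the merge fold over the dialogs it emits.
theorem fused (max_tokens : Int) (ts : List String) :
    ∀ (cur : List String) (s : List (List String) × List String),
    ts.foldl (pvB_step max_tokens) (cur, s)
      = ((ts.foldl pvA_split ([], cur)).2,
         (ts.foldl pvA_split ([], cur)).1.foldl (pvB_merge max_tokens) s) := by
  induction ts with
  | nil => intro cur s; simp
  | cons t ts ih =>
    intro cur s
    by_cases h1 : t = "[S1]"
    · subst h1
      by_cases h2 : cur = []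
      · simp [pvB_step, pvA_split, h2, ih]
      · have hl : cur.length ≠ 0 := by simpa using h2
        simp only [List.foldl_cons, pvB_step, pvA_split, h2, hl, and_true, ne_eq,
          not_false_eq_true, ite_true]
        rw [ih, List.nil_append, split_acc ts [cur] ["[S1]"]]
        simp
    · simp [List.foldl_cons, pvB_step, pvA_split, h1, ih]

-- ===== VERDICT (by name: the statement is the Claim_ definition above) =====
theorem chunk_tokens_dialog_spec : Claim_equal_chunk_tokens_dialog := by
  intro tokens_list max_tokens _
  unfold Spec_chunk_tokens_dialog chunk_tokens_dialog chunk_tokens_dialog_alt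
  rw [fused max_tokens tokens_list [] ([], []), merge_eq]
  by_cases h : (tokens_list.foldl pvA_split ([], [])).2 = []
  · simp [h, List.length_pos_iff]
  · have hl : (tokens_list.foldl pvA_split ([], [])).2.length ≠ 0 := by simpa using h
    simp [h, hl, List.length_pos_iff, pvB_merge]
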